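-- pv_equiv track=rewrite | github.com/srikirancse/EPIJudge | epi_judge_python/is_string_in_matrix.py | is_pattern_contained_in_grid
-- ===== SOURCE A (Python) =====
-- def is_pattern_contained_in_grid(grid, S):
--     def is_pattern_contained_in_grid_helper(x, y, offset):
--         if len(S) == offset:
--             return True
--
--         if (0 <= x < len(grid) and 0 <= y < len(grid[x])
--                 and grid[x][y] == S[offset]
--                 and (x, y, offset) not in previous_attempts
--                 and any(is_pattern_contained_in_grid_helper(x + a, y + b, offset + 1) for a, b in ((-1, 0), (1, 0), (0, -1), (0, 1)))):
--             return True
--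
--         previous_attempts.add((x, y, offset))
--
--         return False
--
--     previous_attempts = set()
--     return any(is_pattern_contained_in_grid_helper(i, j, 0) for i in range(len(grid)) for j in range(len(grid[i])))
--     return True
-- ===== SOURCE B (Python) =====
-- def is_pattern_contained_in_grid(grid, S):
--     # Backward dynamic programming over pattern suffixes: cur holds the cells
--     # from which the suffix of S processed so far can be spelled starting there.
--     if not S:
--         return any(len(row) > 0 for row in grid)
--     cur = [(i, j) for i, row in enumerate(grid) for j, v in enumerate(row) if v == S[-1]]
--     for ch in reversed(S[:-1]):
--         curset = set(cur)
--         cur = [(i, j) for i, row in enumerate(grid) for j, v in enumerate(row)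
--                if v == ch and any((i + a, j + b) in curset for a, b in ((-1, 0), (1, 0), (0, -1), (0, 1)))]
--         if not cur:
--             return False
--     return bool(cur)
-- ===== Notes on version B (the rewrite author's own statement) =====
-- stated objective: alternative
-- what changed: Replaces the memoized recursive DFS from every start cell with an iterative backward dynamic program over pattern suffixes: one layer of matching cells per pattern character, with early exit when a layer is empty.
import Mathlib
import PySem

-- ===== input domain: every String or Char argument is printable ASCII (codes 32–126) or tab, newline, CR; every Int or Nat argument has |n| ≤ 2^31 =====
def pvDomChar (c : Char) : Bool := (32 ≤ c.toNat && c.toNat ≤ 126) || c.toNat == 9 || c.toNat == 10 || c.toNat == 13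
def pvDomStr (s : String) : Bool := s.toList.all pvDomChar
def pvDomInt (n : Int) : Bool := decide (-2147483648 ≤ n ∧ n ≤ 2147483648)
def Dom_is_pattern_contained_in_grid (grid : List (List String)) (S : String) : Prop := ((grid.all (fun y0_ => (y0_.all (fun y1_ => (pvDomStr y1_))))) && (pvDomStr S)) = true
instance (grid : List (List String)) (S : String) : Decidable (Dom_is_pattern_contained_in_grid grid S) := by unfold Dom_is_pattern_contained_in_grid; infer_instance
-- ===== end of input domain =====

-- B replaces A's memoized recursive DFS with an iterative backward dynamic program over
-- pattern suffixes (one layer of matching cells per character); objective: alternative.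

-- ===== PORT A =====
-- helper(x, y, offset) with previous_attempts threaded as explicit state; fuel = len(S) - offset
-- (the 'len(S) == offset' test is the fuel-0 case), short-circuiting 'any' over the 4 neighbors.
-- Python's short-circuiting 'any' over the neighbor generator, with the mutated
-- previous_attempts set threaded as explicit state: keep a True result, else continue.
def pvTry (r : Bool × PySem.Set (Int × Int × Nat))
    (k : PySem.Set (Int × Int × Nat) → Bool × PySem.Set (Int × Int × Nat)) :
    Bool × PySem.Set (Int × Int × Nat) :=
  if r.1 then r else k r.2

def pvHelperA (g : List (List String)) (s : List Char) :
    Nat → Int → Int → Nat → PySem.Set (Int × Int × Nat) → Bool × PySem.Set (Int × Int × Nat)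
  | 0, _, _, _, prev => (true, prev)
  | fuel+1, x, y, off, prev =>
    if 0 ≤ x ∧ x < (g.length : Int) ∧ 0 ≤ y ∧ y < ((g.getD x.toNat []).length : Int)
        ∧ (g.getD x.toNat []).getD y.toNat "" = String.ofList [s.getD off ' ']
        ∧ ¬ PySem.Set.contains prev (x, y, off) = true then
      pvTry (pvHelperA g s fuel (x-1) y (off+1) prev) (fun p1 =>
        pvTry (pvHelperA g s fuel (x+1) y (off+1) p1) (fun p2 =>
          pvTry (pvHelperA g s fuel x (y-1) (off+1) p2) (fun p3 =>
            pvTry (pvHelperA g s fuel x (y+1) (off+1) p3) (fun p4 =>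
              (false, PySem.Set.add p4 (x, y, off))))))
    else (false, PySem.Set.add prev (x, y, off))

-- for i in range(len(grid)) for j in range(len(grid[i]))
def pvCellsA (g : List (List String)) : List (Int × Int) :=
  (List.range g.length).flatMap (fun i =>
    (List.range ((g.getD i []).length)).map (fun (j : Nat) => ((i : Int), (j : Int))))

-- any(helper(i, j, 0) for ...), threading previous_attempts
def pvGoA (g : List (List String)) (s : List Char) :
    List (Int × Int) → PySem.Set (Int × Int × Nat) → Bool
  | [], _ => false
  | (i, j) :: rest, prev =>
    match pvHelperA g s s.length i j 0 prev with
    | (true, _) => true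
    | (false, p) => pvGoA g s rest p

def is_pattern_contained_in_grid (grid : List (List String)) (S : String) : Bool :=
  pvGoA grid S.toList (pvCellsA grid) PySem.Set.empty

-- ===== PORT B =====
-- the comprehension [(i, j) for i, row in enumerate(grid) for j, v in enumerate(row) if f(i, j, v)]
def pvCompB (g : List (List String)) (f : Int → Int → String → Bool) : List (Int × Int) :=
  (PySem.List.enumerate g).flatMap (fun p =>
    (PySem.List.enumerate p.2).filterMap (fun q =>
      if f p.1 q.1 q.2 = true then some (p.1, q.1) else none))

def pvInitB (g : List (List String)) (c : Char) : List (Int × Int) :=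
  pvCompB g (fun _ _ v => v == String.ofList [c])

def pvStepB (g : List (List String)) (cur : List (Int × Int)) (c : Char) : List (Int × Int) :=
  let curset := PySem.Set.ofList cur
  pvCompB g (fun i j v =>
    (v == String.ofList [c]) &&
      ([((-1 : Int), (0 : Int)), (1, 0), (0, -1), (0, 1)].any
        (fun ab => PySem.Set.contains curset (i + ab.1, j + ab.2))))

def pvLoopB (g : List (List String)) : List Char → List (Int × Int) → Bool
  | [], cur => !cur.isEmpty
  | c :: rest, cur =>
    let nxt := pvStepB g cur c
    if nxt.isEmpty then false else pvLoopB g rest nxt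

def is_pattern_contained_in_grid_alt (grid : List (List String)) (S : String) : Bool :=
  if S.toList.isEmpty then grid.any (fun row => decide (0 < row.length))
  else pvLoopB grid S.toList.dropLast.reverse (pvInitB grid (S.toList.getLastD ' '))

-- ===== PRECONDITION & SPEC =====
def Spec_is_pattern_contained_in_grid (grid : List (List String)) (S : String) (out : Bool) : Prop := out = is_pattern_contained_in_grid_alt grid S
instance (grid : List (List String)) (S : String) (out : Bool) : Decidable (Spec_is_pattern_contained_in_grid grid S out) := by unfold Spec_is_pattern_contained_in_grid; infer_instance

-- ===== CLAIM (what is proved, stated in full; the proofs are below) =====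
def Claim_equal_is_pattern_contained_in_grid : Prop := ∀ (grid : List (List String)) (S : String), Dom_is_pattern_contained_in_grid grid S → Spec_is_pattern_contained_in_grid grid S (is_pattern_contained_in_grid grid S)

-- ===== LEMMAS AND PROOFS =====

-- Reference predicate: pvOk g t x y = "the pattern t can be spelled by an adjacency path
-- starting at cell (x, y)" (cells may repeat).
def pvOk (g : List (List String)) : List Char → Int → Int → Bool
  | [], _, _ => true
  | c :: rest, x, y =>
    (decide (0 ≤ x ∧ x < (g.length : Int) ∧ 0 ≤ y ∧ y < ((g.getD x.toNat []).length : Int)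
        ∧ (g.getD x.toNat []).getD y.toNat "" = String.ofList [c]))
    && ([(x-1, y), (x+1, y), (x, y-1), (x, y+1)].any (fun p => pvOk g rest p.1 p.2))

def pvInv (g : List (List String)) (s : List Char) (prev : PySem.Set (Int × Int × Nat)) : Prop :=
  ∀ t ∈ prev, pvOk g (s.drop t.2.2) t.1 t.2.1 = false

lemma pvOk_cons (g : List (List String)) (c : Char) (t : List Char) (x y : Int) :
    pvOk g (c :: t) x y =
      ((decide (0 ≤ x ∧ x < (g.length : Int) ∧ 0 ≤ y ∧ y < ((g.getD x.toNat []).length : Int)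
          ∧ (g.getD x.toNat []).getD y.toNat "" = String.ofList [c]))
        && (pvOk g t (x-1) y || pvOk g t (x+1) y || pvOk g t x (y-1) || pvOk g t x (y+1))) := by
  simp [pvOk, Bool.or_assoc]

lemma pvHelperA_ok (g : List (List String)) (s : List Char) :
    ∀ (fuel off : Nat) (x y : Int) (prev : PySem.Set (Int × Int × Nat)),
      off + fuel = s.length → pvInv g s prev →
      (pvHelperA g s fuel x y off prev).1 = pvOk g (s.drop off) x y ∧
      pvInv g s (pvHelperA g s fuel x y off prev).2 := by
  intro fuel
  induction fuel with
  | zero =>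
    intro off x y prev hlen hinv
    have hoff : off = s.length := by omega
    subst hoff
    simp [pvHelperA, List.drop_length, pvOk, hinv]
  | succ fuel ih =>
    intro off x y prev hlen hinv
    have hoff : off < s.length := by omega
    have hdrop : s.drop off = s[off] :: s.drop (off + 1) := List.drop_eq_getElem_cons hoff
    have hget : s.getD off ' ' = s[off] := by
      rw [List.getD_eq_getElem?_getD, List.getElem?_eq_getElem hoff, Option.getD_some]
    rw [hdrop, pvOk_cons, pvHelperA]
    by_cases hC : 0 ≤ x ∧ x < (g.length : Int) ∧ 0 ≤ y ∧ y < ((g.getD x.toNat []).length : Int)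
        ∧ (g.getD x.toNat []).getD y.toNat "" = String.ofList [s[off]]
    · by_cases hmem : (x, y, off) ∈ prev
      · -- memo hit: helper returns false, and the invariant says pvOk is false here
        have hcont : PySem.Set.contains prev (x, y, off) = true := by
          simpa [PySem.Set.contains] using hmem
        rw [if_neg (by intro hc; rw [hget] at hc; exact hc.2.2.2.2.2 hcont)]
        have hfalse := hinv _ hmem
        rw [hdrop, pvOk_cons] at hfalse
        constructor
        · exact hfalse.symm
        · intro t ht
          rcases (PySem.Set.mem_add _ _ _).1 ht with h | h
          · exact hinv _ h
          · subst h; rw [hdrop, pvOk_cons]; exact hfalse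
      · -- really recurse on the four neighbors
        have hcont : ¬ PySem.Set.contains prev (x, y, off) = true := by
          simpa [PySem.Set.contains] using hmem
        rw [if_pos (by rw [hget]; exact ⟨hC.1, hC.2.1, hC.2.2.1, hC.2.2.2.1, hC.2.2.2.2, hcont⟩)]
        have hC' : decide (0 ≤ x ∧ x < (g.length : Int) ∧ 0 ≤ y ∧ y < ((g.getD x.toNat []).length : Int)
            ∧ (g.getD x.toNat []).getD y.toNat "" = String.ofList [s[off]]) = true :=
        decide_eq_true hC
        obtain ⟨h1, hi1⟩ := ih (off + 1) (x - 1) y prev (by omega) hinv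
        rcases hr1 : pvHelperA g s fuel (x - 1) y (off + 1) prev with ⟨b1, p1⟩
        rw [hr1] at h1 hi1
        simp only [pvTry]
        cases b1 with
        | true => exact ⟨by simp only [hC', ← h1]; simp, hi1⟩
        | false =>
          simp only [Bool.false_eq_true, if_false]
          obtain ⟨h2, hi2⟩ := ih (off + 1) (x + 1) y p1 (by omega) hi1
          rcases hr2 : pvHelperA g s fuel (x + 1) y (off + 1) p1 with ⟨b2, p2⟩
          rw [hr2] at h2 hi2
          simp only [hr2, pvTry]
          cases b2 with
          | true => exact ⟨by simp only [hC', ← h1, ← h2]; simp, hi2⟩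
          | false =>
            simp only [Bool.false_eq_true, if_false]
            obtain ⟨h3, hi3⟩ := ih (off + 1) x (y - 1) p2 (by omega) hi2
            rcases hr3 : pvHelperA g s fuel x (y - 1) (off + 1) p2 with ⟨b3, p3⟩
            rw [hr3] at h3 hi3
            simp only [hr3, pvTry]
            cases b3 with
            | true => exact ⟨by simp only [hC', ← h1, ← h2, ← h3]; simp, hi3⟩
            | false =>
              simp only [Bool.false_eq_true, if_false]
              obtain ⟨h4, hi4⟩ := ih (off + 1) x (y + 1) p3 (by omega) hi3
              rcases hr4 : pvHelperA g s fuel x (y + 1) (off + 1) p3 with ⟨b4, p4⟩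
              rw [hr4] at h4 hi4
              simp only [hr4, pvTry]
              cases b4 with
              | true => exact ⟨by simp only [hC', ← h1, ← h2, ← h3, ← h4]; simp, hi4⟩
              | false =>
                simp only [Bool.false_eq_true, if_false]
                refine ⟨by simp only [hC', ← h1, ← h2, ← h3, ← h4]; simp, ?_⟩
                intro t ht
                rcases (PySem.Set.mem_add _ _ _).1 ht with h | h
                · exact hi4 _ h
                · subst h
                  rw [hdrop, pvOk_cons]
                  simp only [hC', ← h1, ← h2, ← h3, ← h4]
                  simp
    · -- bounds / character check fails: pvOk is false too
      rw [if_neg (by intro hc; rw [hget] at hc; exact hC ⟨hc.1, hc.2.1, hc.2.2.1, hc.2.2.2.1, hc.2.2.2.2.1⟩)]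
      have hdec : decide (0 ≤ x ∧ x < (g.length : Int) ∧ 0 ≤ y ∧ y < ((g.getD x.toNat []).length : Int)
          ∧ (g.getD x.toNat []).getD y.toNat "" = String.ofList [s[off]]) = false :=
        decide_eq_false hC
      constructor
      · simp only [hdec]; simp
      · intro t ht
        rcases (PySem.Set.mem_add _ _ _).1 ht with h | h
        · exact hinv _ h
        · subst h; rw [hdrop, pvOk_cons]; simp only [hdec]; simp

lemma pvGoA_ok (g : List (List String)) (s : List Char) :
    ∀ (cells : List (Int × Int)) (prev : PySem.Set (Int × Int × Nat)), pvInv g s prev →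
      pvGoA g s cells prev = cells.any (fun p => pvOk g s p.1 p.2) := by
  intro cells
  induction cells with
  | nil => intro prev _; simp [pvGoA]
  | cons hd rest ih =>
    intro prev hinv
    rcases hd with ⟨i, j⟩
    obtain ⟨h1, hi1⟩ := pvHelperA_ok g s s.length 0 i j prev (by omega) hinv
    rcases hr : pvHelperA g s s.length i j 0 prev with ⟨b, p⟩
    rw [hr] at h1 hi1
    simp only [List.drop_zero] at h1
    cases b with
    | true => simp [pvGoA, hr, ← h1]
    | false => simp [pvGoA, hr, ← h1, ih p hi1]

lemma pvMem_cellsA (g : List (List String)) (p : Int × Int) :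
    p ∈ pvCellsA g ↔ ∃ k : Nat, k < g.length ∧ ∃ m : Nat, m < (g.getD k []).length ∧
      p = ((k : Int), (m : Int)) := by
  unfold pvCellsA
  constructor
  · intro hp
    rcases List.mem_flatMap.1 hp with ⟨i, hi, hmem⟩
    rcases List.mem_map.1 hmem with ⟨j, hj, rfl⟩
    exact ⟨i, List.mem_range.1 hi, j, List.mem_range.1 hj, rfl⟩
  · rintro ⟨k, hk, m, hm, rfl⟩
    exact List.mem_flatMap.2 ⟨k, List.mem_range.2 hk, List.mem_map.2 ⟨m, List.mem_range.2 hm, rfl⟩⟩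

lemma pvMem_compB (g : List (List String)) (f : Int → Int → String → Bool) (p : Int × Int) :
    p ∈ pvCompB g f ↔ ∃ k : Nat, k < g.length ∧ ∃ m : Nat, m < (g.getD k []).length ∧
      f k m ((g.getD k []).getD m "") = true ∧ p = ((k : Int), (m : Int)) := by
  have hgetg : ∀ (k : Nat) (hk : k < g.length), g.getD k [] = g[k]'hk := by
    intro k hk; rw [List.getD_eq_getElem?_getD, List.getElem?_eq_getElem hk, Option.getD_some]
  have hgetr : ∀ (r : List String) (m : Nat) (hm : m < r.length), r.getD m "" = r[m]'hm := by
    intro r m hm; rw [List.getD_eq_getElem?_getD, List.getElem?_eq_getElem hm, Option.getD_some]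
  simp only [pvCompB, List.mem_flatMap, List.mem_filterMap, PySem.List.mem_enumerate_iff]
  constructor
  · rintro ⟨pr, ⟨k, hk, rfl⟩, q, ⟨m, hm, rfl⟩, hif⟩
    simp only [zero_add] at hif hm ⊢
    split at hif
    · rcases Option.some.inj hif with rfl
      refine ⟨k, hk, m, ?_, ?_, by simp⟩
      · rw [hgetg k hk]; exact hm
      · rw [hgetg k hk, hgetr _ m hm]; simpa using ‹_›
    · cases hif
  · rintro ⟨k, hk, m, hm, hf, rfl⟩
    have hm' : m < (g[k]'hk).length := by rw [← hgetg k hk]; exact hm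
    refine ⟨(0 + (k : Int), g[k]'hk), ⟨k, hk, rfl⟩, ((0 : Int) + (m : Int), (g[k]'hk)[m]'hm'), ⟨m, hm', by simp⟩, ?_⟩
    rw [if_pos ?_]
    · simp
    · simp only [zero_add]
      rw [hgetg k hk, hgetr _ m hm'] at hf
      exact hf

def pvCurInv (g : List (List String)) (t : List Char) (cur : List (Int × Int)) : Prop :=
  ∀ p : Int × Int, p ∈ cur ↔ pvOk g t p.1 p.2 = true

lemma pvOk_bounds (g : List (List String)) (c : Char) (t : List Char) (x y : Int)
    (h : pvOk g (c :: t) x y = true) :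
    ∃ k : Nat, k < g.length ∧ ∃ m : Nat, m < (g.getD k []).length ∧ x = (k : Int) ∧ y = (m : Int) := by
  rw [pvOk_cons, Bool.and_eq_true] at h
  have hb := of_decide_eq_true h.1
  refine ⟨x.toNat, by omega, y.toNat, ?_, by omega, by omega⟩
  have := hb.2.2.2.1
  omega

lemma pvBoundsOf (g : List (List String)) (c : Char) (k m : Nat) (hk : k < g.length)
    (hm : m < (g.getD k []).length) (hf : (g.getD k []).getD m "" = String.ofList [c]) :
    (0 ≤ ((k : Nat) : Int) ∧ ((k : Nat) : Int) < (g.length : Int) ∧ 0 ≤ ((m : Nat) : Int)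
      ∧ ((m : Nat) : Int) < ((g.getD ((k : Nat) : Int).toNat []).length : Int)
      ∧ (g.getD ((k : Nat) : Int).toNat []).getD ((m : Nat) : Int).toNat "" = String.ofList [c]) := by
  simp only [Int.toNat_natCast]
  refine ⟨by positivity, by exact_mod_cast hk, by positivity, by exact_mod_cast hm, hf⟩

lemma pvInitB_inv (g : List (List String)) (c : Char) : pvCurInv g [c] (pvInitB g c) := by
  intro p
  rw [pvInitB, pvMem_compB]
  constructor
  · rintro ⟨k, hk, m, hm, hf, rfl⟩
    rw [pvOk_cons, Bool.and_eq_true]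
    refine ⟨decide_eq_true (pvBoundsOf g c k m hk hm (by simpa using hf)), by simp [pvOk]⟩
  · intro h
    obtain ⟨k, hk, m, hm, hx, hy⟩ := pvOk_bounds g c [] p.1 p.2 h
    rw [pvOk_cons, Bool.and_eq_true] at h
    have hb := of_decide_eq_true h.1
    rw [hx, hy, Int.toNat_natCast, Int.toNat_natCast] at hb
    refine ⟨k, hk, m, hm, by simpa using hb.2.2.2.2, by rw [Prod.ext_iff]; exact ⟨hx, hy⟩⟩

lemma pvStepB_inv (g : List (List String)) (t : List Char) (cur : List (Int × Int)) (c : Char)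
    (h : pvCurInv g t cur) : pvCurInv g (c :: t) (pvStepB g cur c) := by
  intro p
  have hmem : ∀ q : Int × Int, PySem.Set.contains (PySem.Set.ofList cur) q = true ↔ pvOk g t q.1 q.2 = true := by
    intro q
    have hc : PySem.Set.contains (PySem.Set.ofList cur) q = true ↔ q ∈ PySem.Set.ofList cur := by
      simp [PySem.Set.contains]
    rw [hc, PySem.Set.mem_ofList]; exact h q
  rw [pvStepB, pvMem_compB]
  constructor
  · rintro ⟨k, hk, m, hm, hf, rfl⟩
    rw [pvOk_cons]
    simp only [Bool.and_eq_true, beq_iff_eq, List.any_eq_true] at hf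
    obtain ⟨hcell, ⟨ab, hab, hcon⟩⟩ := hf
    have hok := (hmem _).1 hcon
    have hbnd : (0 : Int) ≤ (k : Int) ∧ (k : Int) < (g.length : Int) ∧ (0 : Int) ≤ (m : Int)
        ∧ (m : Int) < ((g.getD (k : Int).toNat []).length : Int)
        ∧ (g.getD (k : Int).toNat []).getD (m : Int).toNat "" = String.ofList [c] := by
      refine ⟨by positivity, by exact_mod_cast hk, by positivity, ?_, ?_⟩
      · simp only [Int.toNat_natCast]; exact_mod_cast hm
      · simpa [Int.toNat_natCast] using hcell
    rw [Bool.and_eq_true]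
    refine ⟨decide_eq_true hbnd, ?_⟩
    rw [Bool.or_eq_true, Bool.or_eq_true, Bool.or_eq_true]
    fin_cases hab
    · exact Or.inl (Or.inl (Or.inl (by simpa [sub_eq_add_neg] using hok)))
    · exact Or.inl (Or.inl (Or.inr (by simpa using hok)))
    · exact Or.inl (Or.inr (by simpa [sub_eq_add_neg] using hok))
    · exact Or.inr (by simpa using hok)
  · intro hok
    obtain ⟨k, hk, m, hm, hx, hy⟩ := pvOk_bounds g c t p.1 p.2 hok
    rw [pvOk_cons] at hok
    rw [Bool.and_eq_true] at hok
    have hb := hok.1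
    simp only [decide_eq_true_eq] at hb
    refine ⟨k, hk, m, hm, ?_, by rw [Prod.ext_iff]; exact ⟨hx, hy⟩⟩
    rw [Bool.and_eq_true]
    constructor
    · simp only [beq_iff_eq]
      have := hb.2.2.2.2
      rwa [hx, hy, Int.toNat_natCast, Int.toNat_natCast] at this
    · have hany := hok.2
      rw [Bool.or_eq_true, Bool.or_eq_true, Bool.or_eq_true] at hany
      simp only [List.any_eq_true]
      rcases hany with ((hqok | hqok) | hqok) | hqok
      · exact ⟨((-1 : Int), (0 : Int)), by simp, (hmem _).2 (by simpa [sub_eq_add_neg, hx, hy] using hqok)⟩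
      · exact ⟨((1 : Int), (0 : Int)), by simp, (hmem _).2 (by simpa [hx, hy] using hqok)⟩
      · exact ⟨((0 : Int), (-1 : Int)), by simp, (hmem _).2 (by simpa [sub_eq_add_neg, hx, hy] using hqok)⟩
      · exact ⟨((0 : Int), (1 : Int)), by simp, (hmem _).2 (by simpa [hx, hy] using hqok)⟩

lemma pvOk_append_exists (g : List (List String)) :
    ∀ (u v : List Char) (x y : Int), pvOk g (u ++ v) x y = true →
      ∃ p : Int × Int, pvOk g v p.1 p.2 = true := by
  intro u
  induction u with
  | nil => intro v x y h; exact ⟨(x, y), h⟩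
  | cons d u ih =>
    intro v x y h
    rw [List.cons_append, pvOk_cons, Bool.and_eq_true] at h
    have h2 := h.2
    rw [Bool.or_eq_true, Bool.or_eq_true, Bool.or_eq_true] at h2
    rcases h2 with ((h3 | h3) | h3) | h3 <;> exact ih v _ _ h3

lemma pvLoopB_ok (g : List (List String)) :
    ∀ (r : List Char) (t : List Char) (cur : List (Int × Int)), pvCurInv g t cur →
      (pvLoopB g r cur = true ↔ ∃ p : Int × Int, pvOk g (r.reverse ++ t) p.1 p.2 = true) := by
  intro r
  induction r with
  | nil =>
    intro t cur hinv
    simp only [pvLoopB, List.reverse_nil, List.nil_append, Bool.not_eq_true']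
    rw [List.isEmpty_eq_false_iff_exists_mem]
    constructor
    · rintro ⟨p, hp⟩; exact ⟨p, (hinv p).1 hp⟩
    · rintro ⟨p, hp⟩; exact ⟨p, (hinv p).2 hp⟩
  | cons c r ih =>
    intro t cur hinv
    have hstep := pvStepB_inv g t cur c hinv
    simp only [pvLoopB]
    by_cases he : (pvStepB g cur c).isEmpty
    · rw [if_pos he]
      simp only [Bool.false_eq_true, false_iff, not_exists]
      intro p hp
      rw [List.reverse_cons, List.append_assoc, List.singleton_append] at hp
      obtain ⟨q, hq⟩ := pvOk_append_exists g r.reverse (c :: t) p.1 p.2 hp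
      have : q ∈ pvStepB g cur c := (hstep q).2 hq
      rw [List.isEmpty_iff] at he
      simp [he] at this
    · rw [if_neg he]
      rw [ih (c :: t) _ hstep]
      rw [List.reverse_cons, List.append_assoc, List.singleton_append]

lemma pvInv_empty (g : List (List String)) (s : List Char) : pvInv g s PySem.Set.empty := by
  intro t ht
  simp [PySem.Set.empty] at ht

-- ===== VERDICT (by name: the statement is the Claim_ definition above) =====
theorem is_pattern_contained_in_grid_spec : Claim_equal_is_pattern_contained_in_grid := by
  intro grid S _
  unfold Spec_is_pattern_contained_in_grid is_pattern_contained_in_grid is_pattern_contained_in_grid_alt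
  rw [pvGoA_ok grid S.toList (pvCellsA grid) PySem.Set.empty (pvInv_empty grid S.toList)]
  rcases hs : S.toList with _ | ⟨c, cs⟩
  · -- empty pattern: both sides say "the grid has at least one cell"
    rw [if_pos (by simp), Bool.eq_iff_iff]
    simp only [List.any_eq_true, pvOk]
    constructor
    · rintro ⟨p, hp, -⟩
      obtain ⟨k, hk, m, hm, rfl⟩ := (pvMem_cellsA grid p).1 hp
      refine ⟨grid[k]'hk, by simp, ?_⟩
      have : grid.getD k [] = grid[k]'hk := by
        simp [List.getD_eq_getElem?_getD, List.getElem?_eq_getElem hk]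
      rw [← this]
      simp only [decide_eq_true_eq]
      omega
    · rintro ⟨row, hrow, hlen⟩
      obtain ⟨k, hk, rfl⟩ := List.mem_iff_getElem.1 hrow
      simp only [decide_eq_true_eq] at hlen
      have hgd : grid.getD k [] = grid[k]'hk := by
        simp [List.getD_eq_getElem?_getD, List.getElem?_eq_getElem hk]
      exact ⟨((k : Int), (0 : Int)), (pvMem_cellsA grid _).2 ⟨k, hk, 0, by rw [hgd]; omega, rfl⟩, by trivial⟩
  · -- non-empty pattern: both sides say "some cell starts a path spelling S"
    have hne : (c :: cs) ≠ ([] : List Char) := by simp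
    have hlast : (c :: cs).getLastD ' ' = (c :: cs).getLast hne := by
      simp [List.getLastD_eq_getLast?, List.getLast?_eq_getLast]
    have hsplit : (c :: cs).dropLast ++ [(c :: cs).getLast hne] = c :: cs :=
      List.dropLast_concat_getLast hne
    rw [if_neg (by simp), Bool.eq_iff_iff, hlast,
      pvLoopB_ok grid ((c :: cs).dropLast.reverse) [(c :: cs).getLast hne] _
        (pvInitB_inv grid ((c :: cs).getLast hne))]
    rw [List.reverse_reverse]
    rw [show (c :: cs).dropLast ++ [(c :: cs).getLast hne] = c :: cs from hsplit]
    simp only [List.any_eq_true]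
    constructor
    · rintro ⟨p, -, hp⟩; exact ⟨p, hp⟩
    · rintro ⟨p, hp⟩
      obtain ⟨k, hk, m, hm, hx, hy⟩ := pvOk_bounds grid c cs p.1 p.2 hp
      refine ⟨p, (pvMem_cellsA grid p).2 ⟨k, hk, m, hm, by rw [Prod.ext_iff]; exact ⟨hx, hy⟩⟩, hp⟩
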